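-- pv_equiv track=rewrite | github.com/devmatias/trybe-exercicios | ciencia-da-computacao/secao-02-algoritmos/recursividade/exercicio-pratico.py | count_par_recursive
-- ===== SOURCE A (Python) =====
-- def count_par_recursive(list):
--     count = 0
--     if len(list) == 0:
--         return count
--     elif list[-1] % 2 == 0:
--         list.pop()
--         return count + 1 + count_par_recursive(list)
--     else:
--         list.pop()
--         return count + count_par_recursive(list)
-- ===== SOURCE B (Python) =====
-- def count_par_recursive(list):
--     count = 0
--     while list:
--         x = list.pop()
--         if x % 2 == 0:
--             count += 1
--     return count
-- ===== Notes on version B (the rewrite author's own statement) =====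
-- stated objective: idiomatic
-- what changed: Replaces the non-tail recursion (count built up on the way back out of the calls) with an iterative while-loop that pops from the end into a running counter, preserving the list-emptying mutation and avoiding RecursionError depth limits.
import Mathlib
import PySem

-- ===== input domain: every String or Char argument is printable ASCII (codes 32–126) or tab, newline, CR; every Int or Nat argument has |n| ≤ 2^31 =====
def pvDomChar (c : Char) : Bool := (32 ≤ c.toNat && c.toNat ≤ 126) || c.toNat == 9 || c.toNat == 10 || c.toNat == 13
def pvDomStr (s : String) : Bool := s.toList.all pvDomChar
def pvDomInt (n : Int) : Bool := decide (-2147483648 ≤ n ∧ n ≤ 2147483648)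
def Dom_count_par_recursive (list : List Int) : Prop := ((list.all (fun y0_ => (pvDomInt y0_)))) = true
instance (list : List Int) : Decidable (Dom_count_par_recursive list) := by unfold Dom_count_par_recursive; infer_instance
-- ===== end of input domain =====

-- B replaces A's non-tail recursion by an iterative pop-from-the-end loop with a running counter
-- (same return value; both A and B empty the input list in Python — equivalence here is about the return value).

-- ===== PORT A =====
-- A: recursion on the list, popping the last element; count added on the way back out.
def count_par_recursive (list : List Int) : Int :=
  if list.length = 0 then 0
  else if PySem.Int.mod ((PySem.List.pyGet? list (-1)).getD 0) 2 = 0 then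
    0 + 1 + count_par_recursive list.dropLast
  else
    0 + count_par_recursive list.dropLast
termination_by list.length
decreasing_by
  all_goals
    simp [List.length_dropLast]; omega

-- ===== PORT B =====
-- B: while-loop with an accumulator `count`, popping the last element each iteration.
def countParLoop (list : List Int) (count : Int) : Int :=
  if list.length = 0 then count
  else
    let x := (PySem.List.pyGet? list (-1)).getD 0
    countParLoop list.dropLast (if PySem.Int.mod x 2 = 0 then count + 1 else count)
termination_by list.length
decreasing_by
  simp [List.length_dropLast]; omega

def count_par_recursive_alt (list : List Int) : Int :=
  countParLoop list 0

-- ===== PRECONDITION & SPEC =====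
def Spec_count_par_recursive (list : List Int) (out : Int) : Prop := out = count_par_recursive_alt list
instance (list : List Int) (out : Int) : Decidable (Spec_count_par_recursive list out) := by unfold Spec_count_par_recursive; infer_instance

-- ===== CLAIM (what is proved, stated in full; the proofs are below) =====
def Claim_equal_count_par_recursive : Prop := ∀ (list : List Int), Dom_count_par_recursive list → Spec_count_par_recursive list (count_par_recursive list)

-- ===== LEMMAS AND PROOFS =====

-- The loop's accumulator factors out: countParLoop l c = c + countParLoop l 0 = c + A's value.
theorem countParLoop_eq_add (l : List Int) (c : Int) :
    countParLoop l c = c + count_par_recursive l := by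
  induction l using List.reverseRecOn generalizing c with
  | nil => rw [countParLoop.eq_def, count_par_recursive.eq_def]; simp
  | append_singleton xs x ih =>
      have h1 : ¬ ((xs ++ [x]).length = 0) := by simp
      rw [countParLoop.eq_def, count_par_recursive.eq_def, if_neg h1, if_neg h1]
      simp only [List.dropLast_concat, PySem.List.pyGet?_neg_one_append_singleton,
        Option.getD_some]
      by_cases hp : PySem.Int.mod x 2 = 0
      · rw [if_pos hp, if_pos hp, ih]; ring
      · rw [if_neg hp, if_neg hp, ih]; ring

-- ===== VERDICT (by name: the statement is the Claim_ definition above) =====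
theorem count_par_recursive_spec : Claim_equal_count_par_recursive := by
  intro l _
  unfold Spec_count_par_recursive count_par_recursive_alt
  rw [countParLoop_eq_add]
  ring
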